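-- pv_equiv track=rewrite | github.com/rwu8/CMU-python | week9/wk9_practice.py | f
-- ===== SOURCE A (Python) =====
-- def f(a):
--    # assume a is a list of integers
--    if (len(a) == 0):
--       return 0
--    elif (len(a) == 1):
--       return (a[0] % 2)
--    else:
--       i = len(a)//2
--       return f(a[:i]) + f(a[i:])
-- ===== SOURCE B (Python) =====
-- def f(a):
--     # Single iterative pass: count odd integers by summing x % 2.
--     total = 0
--     for x in a:
--         total += x % 2
--     return total
-- ===== Notes on version B (the rewrite author's own statement) =====
-- stated objective: simpler
-- what changed: Replaces the divide-and-conquer recursion over list halves (with O(n log n) slice copying) by one iterative left-to-right pass accumulating x % 2.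
import Mathlib
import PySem

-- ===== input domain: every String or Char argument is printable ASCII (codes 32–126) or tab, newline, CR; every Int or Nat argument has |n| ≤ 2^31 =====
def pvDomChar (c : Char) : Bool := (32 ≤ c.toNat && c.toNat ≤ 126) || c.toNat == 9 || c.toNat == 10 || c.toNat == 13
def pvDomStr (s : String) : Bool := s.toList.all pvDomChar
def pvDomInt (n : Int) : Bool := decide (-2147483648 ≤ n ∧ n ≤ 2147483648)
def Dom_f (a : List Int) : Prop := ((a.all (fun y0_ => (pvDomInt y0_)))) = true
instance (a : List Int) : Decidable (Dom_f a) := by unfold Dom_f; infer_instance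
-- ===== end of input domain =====

-- B replaces A's divide-and-conquer recursion over list halves by one iterative pass summing x % 2 (simpler).

-- ===== PORT A =====
-- a[:i] / a[i:] with 0 ≤ i ≤ len are PySem.List.slice; len(a)//2 on a Nat length equals Nat division (both floor, operands nonnegative).
def f (a : List Int) : Int :=
  if a.length = 0 then 0
  else if a.length = 1 then PySem.Int.mod ((PySem.List.pyGet? a 0).getD 0) 2
  else
    let i : Nat := a.length / 2
    f (PySem.List.slice a none (some (i : Int))) + f (PySem.List.slice a (some (i : Int)) none)
termination_by a.length
decreasing_by
  · rw [PySem.List.slice_to_natCast]; simp; omega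
  · rw [PySem.List.slice_from_natCast]; simp; omega

-- ===== PORT B =====
def f_alt (a : List Int) : Int :=
  a.foldl (fun total x => total + PySem.Int.mod x 2) 0

-- ===== PRECONDITION & SPEC =====
def Spec_f (a : List Int) (out : Int) : Prop := out = f_alt a
instance (a : List Int) (out : Int) : Decidable (Spec_f a out) := by unfold Spec_f; infer_instance

-- ===== CLAIM (what is proved, stated in full; the proofs are below) =====
def Claim_equal_f : Prop := ∀ (a : List Int), Dom_f a → Spec_f a (f a)

-- ===== LEMMAS AND PROOFS =====

theorem f_eq_sum (a : List Int) :
    f a = (a.map (fun x => PySem.Int.mod x 2)).sum := by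
  induction a using f.induct with
  | case1 a h => simp [f, List.length_eq_zero_iff.mp h]
  | case2 a h h1 =>
    obtain ⟨x, rfl⟩ := List.length_eq_one_iff.mp h1
    simp [f, PySem.List.pyGet?, PySem.List.pyIdx?, PySem.Int.mod]
  | case3 a h h1 i ih1 ih2 =>
    rw [f]
    simp only [h, h1, if_false]
    rw [ih1, ih2]
    rw [PySem.List.slice_to_natCast, PySem.List.slice_from_natCast,
      ← List.sum_append, ← List.map_append, List.take_append_drop]

theorem foldl_add_sum (g : Int → Int) (a : List Int) (c : Int) :
    a.foldl (fun total x => total + g x) c = c + (a.map g).sum := by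
  induction a generalizing c with
  | nil => simp
  | cons x xs ih => simp [List.foldl, ih, add_assoc]

theorem f_alt_eq_sum (a : List Int) :
    f_alt a = (a.map (fun x => PySem.Int.mod x 2)).sum := by
  simp [f_alt, foldl_add_sum]

-- ===== VERDICT (by name: the statement is the Claim_ definition above) =====
theorem f_spec : Claim_equal_f := by
  intro a _
  unfold Spec_f
  rw [f_eq_sum, f_alt_eq_sum]
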